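-- pv_equiv track=rewrite | github.com/RyukaST077/ai-first-project | scripts/excel2md_batch.py | split_blocks_by_blank_rows
-- ===== SOURCE A (Python) =====
-- from typing import Any, List, Tuple
--
-- def split_blocks_by_blank_rows(matrix: List[List[str]], blank_rows: int = 1) -> List[List[List[str]]]:
--     """
--     Split matrix into blocks by consecutive blank rows (row where all cells empty strings).
--     blank_rows: number of consecutive blank rows required to split.
--     """
--     if not matrix:
--         return []
--
--     def row_is_blank(row: List[str]) -> bool:
--         return all((cell.strip() == "") for cell in row)
--
--     blocks: List[List[List[str]]] = []
--     current: List[List[str]] = []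
--     blank_run = 0
--
--     for row in matrix:
--         if row_is_blank(row):
--             blank_run += 1
--             if current and blank_run >= blank_rows:
--                 blocks.append(current)
--                 current = []
--         else:
--             blank_run = 0
--             current.append(row)
--
--     if current:
--         blocks.append(current)
--     return blocks
-- ===== SOURCE B (Python) =====
-- def split_blocks_by_blank_rows(matrix, blank_rows=1):
--     """Run-at-a-time variant: peel maximal runs of blank/non-blank rows and
--     decide per run; a blank run splits iff its length >= blank_rows."""
--     def row_is_blank(row):
--         return all(cell.strip() == "" for cell in row)
--
--     blocks = []
--     current = []
--     i = 0
--     n = len(matrix)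
--     while i < n:
--         b = row_is_blank(matrix[i])
--         j = i + 1
--         while j < n and row_is_blank(matrix[j]) == b:
--             j += 1
--         if b:
--             if j - i >= blank_rows and current:
--                 blocks.append(current)
--                 current = []
--         else:
--             current.extend(matrix[i:j])
--         i = j
--     if current:
--         blocks.append(current)
--     return blocks
-- ===== Notes on version B (the rewrite author's own statement) =====
-- stated objective: alternative
-- what changed: Replaces the row-by-row scan with a mutable blank-run counter by a run-at-a-time scan that peels each maximal run of blank/non-blank rows and splits exactly when a blank run's length reaches blank_rows.
import Mathlib
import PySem

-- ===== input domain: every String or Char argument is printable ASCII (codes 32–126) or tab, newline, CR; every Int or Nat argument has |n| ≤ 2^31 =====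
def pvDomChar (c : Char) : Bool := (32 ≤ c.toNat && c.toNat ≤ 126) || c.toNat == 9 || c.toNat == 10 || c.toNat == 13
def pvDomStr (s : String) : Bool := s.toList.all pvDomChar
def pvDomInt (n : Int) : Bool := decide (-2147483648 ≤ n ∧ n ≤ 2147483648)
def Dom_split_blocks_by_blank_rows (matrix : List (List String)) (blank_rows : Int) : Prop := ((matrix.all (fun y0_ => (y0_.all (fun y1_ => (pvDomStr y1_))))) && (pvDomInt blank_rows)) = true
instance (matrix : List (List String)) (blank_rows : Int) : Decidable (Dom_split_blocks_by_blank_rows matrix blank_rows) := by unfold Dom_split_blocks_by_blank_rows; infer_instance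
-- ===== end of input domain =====

-- B replaces A's row-by-row blank-run counter by a run-at-a-time scan over maximal runs (alternative decomposition, same cost).

-- shared helper: Python's row_is_blank (identical in both sources)
def pvRowBlank (row : List String) : Bool := row.all (fun cell => PySem.Str.strip cell == "")

-- ===== PORT A =====
-- state = (blocks, current, blank_run)
def stepA (blank_rows : Int)
    (st : List (List (List String)) × List (List String) × Int) (row : List String) :
    List (List (List String)) × List (List String) × Int :=
  match st with
  | (blocks, current, blank_run) =>
    if pvRowBlank row then
      let blank_run := blank_run + 1
      if !current.isEmpty && blank_rows ≤ blank_run then (blocks ++ [current], [], blank_run)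
      else (blocks, current, blank_run)
    else (blocks, current ++ [row], 0)

-- the trailing 'if current: blocks.append(current)'
def finishA (st : List (List (List String)) × List (List String) × Int) :
    List (List (List String)) :=
  if st.2.1.isEmpty then st.1 else st.1 ++ [st.2.1]

def split_blocks_by_blank_rows (matrix : List (List String)) (blank_rows : Int) :
    List (List (List String)) :=
  if matrix.isEmpty then []
  else finishA (matrix.foldl (stepA blank_rows) ([], [], 0))

-- ===== PORT B =====
-- the outer while loop of Source B: rows = matrix[i:], run = matrix[i:j], rest' = matrix[j:]
def splitAltGo (blank_rows : Int) (rows : List (List String))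
    (blocks : List (List (List String))) (current : List (List String)) :
    List (List (List String)) :=
  match rows with
  | [] => if current.isEmpty then blocks else blocks ++ [current]
  | r :: rest =>
    let b := pvRowBlank r
    let run := r :: rest.takeWhile (fun x => pvRowBlank x == b)
    let rest' := rest.dropWhile (fun x => pvRowBlank x == b)
    if b then
      if blank_rows ≤ (run.length : Int) && !current.isEmpty
      then splitAltGo blank_rows rest' (blocks ++ [current]) []
      else splitAltGo blank_rows rest' blocks current
    else splitAltGo blank_rows rest' blocks (current ++ run)
termination_by rows.length
decreasing_by
  all_goals
    simp only [List.length_cons]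
    exact Nat.lt_succ_of_le (List.length_dropWhile_le _ _)

def split_blocks_by_blank_rows_alt (matrix : List (List String)) (blank_rows : Int) :
    List (List (List String)) :=
  splitAltGo blank_rows matrix [] []

-- ===== PRECONDITION & SPEC =====
def Spec_split_blocks_by_blank_rows (matrix : List (List String)) (blank_rows : Int) (out : List (List (List String))) : Prop := out = split_blocks_by_blank_rows_alt matrix blank_rows
instance (matrix : List (List String)) (blank_rows : Int) (out : List (List (List String))) : Decidable (Spec_split_blocks_by_blank_rows matrix blank_rows out) := by unfold Spec_split_blocks_by_blank_rows; infer_instance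

-- ===== CLAIM (what is proved, stated in full; the proofs are below) =====
def Claim_equal_split_blocks_by_blank_rows : Prop := ∀ (matrix : List (List String)) (blank_rows : Int), Dom_split_blocks_by_blank_rows matrix blank_rows → Spec_split_blocks_by_blank_rows matrix blank_rows (split_blocks_by_blank_rows matrix blank_rows)

-- ===== LEMMAS AND PROOFS =====

-- A over a run of blank rows: flush happens iff current ≠ [] and the counter reaches blank_rows
lemma foldA_blank_run (br : Int) (run : List (List String))
    (h : ∀ r ∈ run, pvRowBlank r = true) :
    ∀ (blocks : List (List (List String))) (current : List (List String)) (k : Int),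
    run.foldl (stepA br) (blocks, current, k) =
      if run ≠ [] ∧ current ≠ [] ∧ br ≤ k + run.length
      then (blocks ++ [current], [], k + run.length)
      else (blocks, current, k + run.length) := by
  induction run with
  | nil => intro blocks current k; simp
  | cons r rs ih =>
    intro blocks current k
    have hr : pvRowBlank r = true := h r (by simp)
    have hrs : ∀ x ∈ rs, pvRowBlank x = true := fun x hx => h x (by simp [hx])
    simp only [List.foldl_cons, stepA, hr, if_true]
    by_cases hc : current = []
    · subst hc
      simp only [List.isEmpty_nil, Bool.not_true, Bool.false_and, Bool.false_eq_true, if_false]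
      rw [ih hrs]
      simp only [List.length_cons]
      split_ifs with h1 h2 <;> try (exfalso; tauto)
      simp only [Prod.ext_iff, true_and]; push_cast; ring
    · have hc' : (!current.isEmpty) = true := by
        simp [hc]
      by_cases hk : br ≤ k + 1
      · simp only [hc', Bool.true_and, decide_eq_true_eq, if_pos hk]
        rw [ih hrs]
        simp only [List.length_cons]
        have hcond : ¬ (rs ≠ [] ∧ (([] : List (List String)) ≠ []) ∧ br ≤ (k+1) + rs.length) := by
          simp
        rw [if_neg hcond]
        have : br ≤ k + (↑rs.length + 1) := by
          have : (0:Int) ≤ rs.length := Int.natCast_nonneg _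
          omega
        rw [if_pos ⟨by simp, hc, by push_cast; omega⟩]
        simp only [Prod.ext_iff, true_and]; push_cast; ring
      · simp only [hc', Bool.true_and, decide_eq_true_eq, if_neg hk]
        rw [ih hrs]
        simp only [List.length_cons]
        have harith : k + 1 + (rs.length : Int) = k + ((rs.length + 1 : Nat) : Int) := by
          push_cast; ring
        simp only [harith]
        by_cases hrs0 : rs = []
        · subst hrs0
          rw [if_neg (by simp), if_neg (by rintro ⟨-, -, h3⟩; simp at h3; omega)]
        · exact if_congr (by simp [hrs0, List.cons_ne_nil]) rfl rfl

lemma foldA_nonblank_run (br : Int) (run : List (List String))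
    (h : ∀ r ∈ run, pvRowBlank r = false) :
    ∀ (blocks : List (List (List String))) (current : List (List String)) (k : Int),
    run.foldl (stepA br) (blocks, current, k) =
      (blocks, current ++ run, if run = [] then k else 0) := by
  induction run with
  | nil => intro blocks current k; simp
  | cons r rs ih =>
    intro blocks current k
    have hr : pvRowBlank r = false := h r (by simp)
    simp only [List.foldl_cons, stepA, hr, Bool.false_eq_true, if_false]
    rw [ih (fun x hx => h x (by simp [hx]))]
    rw [if_neg (List.cons_ne_nil _ _), List.append_assoc, List.singleton_append]
    rcases eq_or_ne rs [] with hrs | hrs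
    · subst hrs; simp
    · rw [if_neg hrs]

lemma main_equiv (br : Int) : ∀ (n : Nat) (rows : List (List String))
    (blocks : List (List (List String))) (current : List (List String)) (k : Int),
    rows.length ≤ n →
    (k = 0 ∨ rows = [] ∨ ∃ r rs, rows = r :: rs ∧ pvRowBlank r = false) →
    finishA (rows.foldl (stepA br) (blocks, current, k)) = splitAltGo br rows blocks current := by
  intro n
  induction n with
  | zero =>
    intro rows blocks current k hn _
    have : rows = [] := List.length_eq_zero_iff.mp (Nat.le_zero.mp hn)
    subst this
    by_cases hc : current.isEmpty <;> simp [splitAltGo, finishA, hc]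
  | succ n ih =>
    intro rows blocks current k hn hk
    match rows with
    | [] =>
      by_cases hc : current.isEmpty <;> simp [splitAltGo, finishA, hc]
    | r :: rest =>
      set p : List String → Bool := fun x => pvRowBlank x == pvRowBlank r with hp
      have hsplit : r :: rest = (r :: rest.takeWhile p) ++ rest.dropWhile p := by
        simp [List.takeWhile_append_dropWhile]
      have hlen2 : (rest.dropWhile p).length ≤ n := by
        have := List.length_dropWhile_le p rest
        simp only [List.length_cons] at hn; omega
      have htake : ∀ x ∈ rest.takeWhile p, pvRowBlank x = pvRowBlank r := by
        intro x hx
        have h' := List.mem_takeWhile_imp hx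
        rw [hp] at h'
        exact beq_iff_eq.mp h'
      have hdrophead : ∀ r' rs', rest.dropWhile p = r' :: rs' → pvRowBlank r' = !pvRowBlank r := by
        intro r' rs' hEq
        have h0 := List.head?_dropWhile_not p rest
        rw [hEq] at h0
        simp only [List.head?_cons] at h0
        rw [hp] at h0
        have h0' : (pvRowBlank r' == pvRowBlank r) = false := h0
        cases h1 : pvRowBlank r' <;> cases h2 : pvRowBlank r <;>
          rw [h1, h2] at h0' <;> revert h0' <;> decide
      have hkdisj : rest.dropWhile p = [] ∨
          (∃ r' rs', rest.dropWhile p = r' :: rs' ∧ pvRowBlank r' = !pvRowBlank r) := by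
        match hEq : rest.dropWhile p with
        | [] => exact Or.inl rfl
        | r' :: rs' => exact Or.inr ⟨r', rs', rfl, hdrophead r' rs' hEq⟩
      cases hb : pvRowBlank r with
      | true =>
        -- blank run; A's counter is 0 at the start of every blank run
        have hk0 : k = 0 := by
          rcases hk with hk | hk | ⟨r', rs', hEq, hval⟩
          · exact hk
          · exact absurd hk (List.cons_ne_nil r rest)
          · injection hEq with h1 h2
            rw [← h1, hb] at hval
            exact absurd hval (by decide)
        subst hk0
        have hblank : ∀ x ∈ r :: rest.takeWhile p, pvRowBlank x = true := by
          intro x hx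
          rcases List.mem_cons.mp hx with rfl | hx
          · exact hb
          · rw [htake x hx, hb]
        have hrecdisj : rest.dropWhile p = [] ∨
            ∃ r' rs', rest.dropWhile p = r' :: rs' ∧ pvRowBlank r' = false := by
          rcases hkdisj with h | ⟨r', rs', hEq, hval⟩
          · exact Or.inl h
          · rw [hb] at hval; simp at hval; exact Or.inr ⟨r', rs', hEq, hval⟩
        conv_lhs => rw [hsplit]
        rw [List.foldl_append, foldA_blank_run br _ hblank]
        conv_rhs => simp only [splitAltGo]
        rw [← hp, if_pos hb]
        by_cases hcond : current ≠ [] ∧ br ≤ 0 + ((r :: rest.takeWhile p).length : Int)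
        · rw [if_pos ⟨by simp, hcond.1, hcond.2⟩]
          rw [if_pos (show (br ≤ ((r :: rest.takeWhile p).length : Int) && !current.isEmpty) = true by
            simp only [Bool.and_eq_true, decide_eq_true_eq, Bool.not_eq_true',
              List.isEmpty_eq_false_iff]
            exact ⟨by have := hcond.2; omega, hcond.1⟩)]
          exact ih _ _ _ _ hlen2 (Or.inr hrecdisj)
        · rw [if_neg (fun h => hcond ⟨h.2.1, h.2.2⟩)]
          rw [if_neg (by
            simp only [Bool.and_eq_true, decide_eq_true_eq, Bool.not_eq_true',
              List.isEmpty_eq_false_iff]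
            intro h; exact hcond ⟨h.2, by have := h.1; omega⟩)]
          exact ih _ _ _ _ hlen2 (Or.inr hrecdisj)
      | false =>
        have hnonblank : ∀ x ∈ r :: rest.takeWhile p, pvRowBlank x = false := by
          intro x hx
          rcases List.mem_cons.mp hx with rfl | hx
          · exact hb
          · rw [htake x hx, hb]
        conv_lhs => rw [hsplit]
        rw [List.foldl_append, foldA_nonblank_run br _ hnonblank,
          if_neg (List.cons_ne_nil _ _)]
        conv_rhs => simp only [splitAltGo]
        rw [← hp, if_neg (by rw [hb]; exact Bool.false_ne_true)]
        exact ih _ _ _ _ hlen2 (Or.inl rfl)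

-- ===== VERDICT (by name: the statement is the Claim_ definition above) =====
theorem split_blocks_by_blank_rows_spec : Claim_equal_split_blocks_by_blank_rows := by
  intro matrix blank_rows _
  unfold Spec_split_blocks_by_blank_rows split_blocks_by_blank_rows split_blocks_by_blank_rows_alt
  match matrix with
  | [] => simp [splitAltGo]
  | r :: rest =>
    rw [if_neg (by simp)]
    exact main_equiv blank_rows (r :: rest).length (r :: rest) [] [] 0 le_rfl (Or.inl rfl)
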